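-- pv_equiv track=rewrite | github.com/aarora8/Interview-Bit | Math/subarray.py | solve
-- ===== SOURCE A (Python) =====
-- def solve(A):
--     count_0 = 0
--     count_1 = 0
--     count_subarr = 0
--     for val in A:
--         if val == str(0):
--             count_0 = count_0 + 1
--         else:
--             count_1 = count_1 + 1
--         if count_0 == count_1:
--             count_subarr = count_subarr + 1
--             count_0 = 0
--             count_1 = 0
--     return count_subarr
-- ===== SOURCE B (Python) =====
-- def solve(A):
--     prefixes = []
--     bal = 0
--     for val in A:
--         bal += 1 if val == str(0) else -1
--         prefixes.append(bal)
--     return prefixes.count(0)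
-- ===== Notes on version B (the rewrite author's own statement) =====
-- stated objective: idiomatic
-- what changed: Replaces the two interleaved counters with inline resets by a two-pass decomposition: build the running prefix-balance table (+1 for '0', -1 otherwise), then count the positions where the balance returns to zero.
import Mathlib
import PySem

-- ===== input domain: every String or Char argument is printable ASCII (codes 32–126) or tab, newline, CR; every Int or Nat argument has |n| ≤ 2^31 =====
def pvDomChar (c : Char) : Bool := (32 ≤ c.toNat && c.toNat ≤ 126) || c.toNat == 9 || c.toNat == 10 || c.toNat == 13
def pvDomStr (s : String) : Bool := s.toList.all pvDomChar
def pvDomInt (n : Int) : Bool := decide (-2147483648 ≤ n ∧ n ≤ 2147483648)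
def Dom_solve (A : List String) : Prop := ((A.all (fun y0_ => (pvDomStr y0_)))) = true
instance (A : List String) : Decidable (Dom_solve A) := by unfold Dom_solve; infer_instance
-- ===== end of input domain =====

-- B builds the prefix-balance table in one pass and counts its zeros in a second,
-- instead of A's interleaved 0/1 counters with inline resets (objective: idiomatic).

-- ===== PORT A =====
def solve (A : List String) : Int :=
  let s := A.foldl (fun (st : Int × Int × Int) val =>
    let c0 := st.1
    let c1 := st.2.1
    let cs := st.2.2
    let c0 := if val == "0" then c0 + 1 else c0
    let c1 := if val == "0" then c1 else c1 + 1
    if c0 == c1 then (0, 0, cs + 1) else (c0, c1, cs)) (0, 0, 0)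
  s.2.2

-- ===== PORT B =====
def solve_alt (A : List String) : Int :=
  let r := A.foldl (fun (st : Int × List Int) val =>
    let b := st.1 + (if val == "0" then (1 : Int) else -1)
    (b, st.2 ++ [b])) (0, ([] : List Int))
  (r.2.count 0 : Int)

-- ===== PRECONDITION & SPEC =====
def Spec_solve (A : List String) (out : Int) : Prop := out = solve_alt A
instance (A : List String) (out : Int) : Decidable (Spec_solve A out) := by unfold Spec_solve; infer_instance

-- ===== CLAIM (what is proved, stated in full; the proofs are below) =====
def Claim_equal_solve : Prop := ∀ (A : List String), Dom_solve A → Spec_solve A (solve A)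

-- ===== LEMMAS AND PROOFS =====

/-- The ±1 step both loops take for each element. -/
def pvStep (v : String) : Int := if v == "0" then 1 else -1

/-- The prefix-balance sequence starting from balance `b`. -/
def pvPref : List String → Int → List Int
  | [], _ => []
  | v :: l, b => (b + pvStep v) :: pvPref l (b + pvStep v)

lemma pvFoldB (l : List String) (b : Int) (acc : List Int) :
    (l.foldl (fun (st : Int × List Int) val =>
      let b := st.1 + (if val == "0" then (1 : Int) else -1)
      (b, st.2 ++ [b])) (b, acc)).2 = acc ++ pvPref l b := by
  induction l generalizing b acc with
  | nil => simp [pvPref]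
  | cons v l ih =>
    rw [List.foldl_cons]
    show (List.foldl _ (b + pvStep v, acc ++ [b + pvStep v]) l).2 = acc ++ pvPref (v :: l) b
    rw [ih]
    simp [pvPref]

lemma pvFoldA (l : List String) (c0 c1 cs : Int) :
    ((l.foldl (fun (st : Int × Int × Int) val =>
      let c0 := st.1
      let c1 := st.2.1
      let cs := st.2.2
      let c0 := if val == "0" then c0 + 1 else c0
      let c1 := if val == "0" then c1 else c1 + 1
      if c0 == c1 then (0, 0, cs + 1) else (c0, c1, cs)) (c0, c1, cs)).2.2)
    = cs + ((pvPref l (c0 - c1)).count 0 : Int) := by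
  induction l generalizing c0 c1 cs with
  | nil => simp [pvPref]
  | cons v l ih =>
    rw [List.foldl_cons]
    show (List.foldl _ (if ((if v == "0" then c0 + 1 else c0) == (if v == "0" then c1 else c1 + 1)) then ((0 : Int), (0 : Int), cs + 1) else ((if v == "0" then c0 + 1 else c0), (if v == "0" then c1 else c1 + 1), cs)) l).2.2 = cs + ((pvPref (v :: l) (c0 - c1)).count 0 : Int)
    by_cases hv : v == "0"
    · simp only [hv, ite_true]
      split_ifs with h
      · rw [ih]
        simp only [beq_iff_eq] at h
        have h1 : c0 - c1 + pvStep v = 0 := by simp only [pvStep, hv, ite_true]; omega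
        simp [pvPref, h1]
        omega
      · rw [ih]
        simp only [beq_iff_eq] at h
        have h2 : c0 + 1 - c1 = c0 - c1 + pvStep v := by simp only [pvStep, hv, ite_true]; ring
        rw [h2]
        have h3 : c0 - c1 + pvStep v ≠ 0 := by simp only [pvStep, hv, ite_true]; omega
        simp [pvPref, h3]
    · simp only [hv, Bool.false_eq_true, ite_false]
      split_ifs with h
      · rw [ih]
        simp only [beq_iff_eq] at h
        have h1 : c0 - c1 + pvStep v = 0 := by simp only [pvStep, hv, Bool.false_eq_true, ite_false]; omega
        simp [pvPref, h1]
        omega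
      · rw [ih]
        simp only [beq_iff_eq] at h
        have h2 : c0 - (c1 + 1) = c0 - c1 + pvStep v := by simp only [pvStep, hv, Bool.false_eq_true, ite_false]; ring
        rw [h2]
        have h3 : c0 - c1 + pvStep v ≠ 0 := by simp only [pvStep, hv, Bool.false_eq_true, ite_false]; omega
        simp [pvPref, h3]

-- ===== VERDICT (by name: the statement is the Claim_ definition above) =====
theorem solve_spec : Claim_equal_solve := by
  intro A _
  unfold Spec_solve solve solve_alt
  rw [pvFoldA]
  simp only [pvFoldB]
  simp
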